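-- pv_equiv track=rewrite | github.com/tongt1/multiagent | src/training/wandb_enrichment/role_mask_computer.py | find_marker_in_text
-- ===== SOURCE A (Python) =====
-- def find_marker_in_text(text: str, markers: list[str]) -> int:
--     """Search text for any marker string and return character offset.
--
--     Args:
--         text: Full trajectory text to search
--         markers: List of marker strings to search for
--
--     Returns:
--         Character offset of the FIRST marker found, or -1 if no marker found.
--         Case-insensitive matching.
--
--     Example:
--         >>> find_marker_in_text("Hello. Please verify this.", ["verify", "check"])
--         15  # Offset of "verify" in the text
--     """
--     text_lower = text.lower()
--
--     earliest_offset = -1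
--     for marker in markers:
--         offset = text_lower.find(marker.lower())
--         if offset >= 0:
--             if earliest_offset < 0 or offset < earliest_offset:
--                 earliest_offset = offset
--
--     return earliest_offset
-- ===== SOURCE B (Python) =====
-- def find_marker_in_text(text: str, markers: list[str]) -> int:
--     """Single left-to-right scan over positions: return the first position where
--     any (lowercased) marker starts; -1 if none. Same value as A on all inputs."""
--     t = text.lower()
--     ms = [m.lower() for m in markers]
--     for i in range(len(t) + 1):
--         if any(t.startswith(m, i) for m in ms):
--             return i
--     return -1
-- ===== Notes on version B (the rewrite author's own statement) =====
-- stated objective: alternative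
-- what changed: A takes the minimum over markers of a per-marker substring search; B makes one left-to-right scan over text positions and returns the first position where any lowercased marker starts, so the per-marker minimum bookkeeping disappears and the scan stops at the earliest match.
import Mathlib
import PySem

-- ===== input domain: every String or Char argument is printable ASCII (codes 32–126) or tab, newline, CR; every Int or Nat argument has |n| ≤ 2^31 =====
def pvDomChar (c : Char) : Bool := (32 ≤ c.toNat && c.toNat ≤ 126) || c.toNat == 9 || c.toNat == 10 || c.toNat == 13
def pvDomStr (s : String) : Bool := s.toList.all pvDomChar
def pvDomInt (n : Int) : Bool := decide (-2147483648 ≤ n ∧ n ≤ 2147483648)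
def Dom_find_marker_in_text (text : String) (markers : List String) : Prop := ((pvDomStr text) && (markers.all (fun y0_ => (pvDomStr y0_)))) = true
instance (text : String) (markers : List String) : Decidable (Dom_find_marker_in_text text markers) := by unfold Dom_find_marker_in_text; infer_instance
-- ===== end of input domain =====

-- B replaces A's per-marker minimum of substring searches by one left-to-right scan over
-- text positions returning the first position where any lowercased marker starts (alternative).

-- ===== PORT A =====
def find_marker_in_text (text : String) (markers : List String) : Int :=
  let text_lower := PySem.Str.lower text
  markers.foldl (fun earliest_offset marker =>
    let offset := PySem.Str.find text_lower (PySem.Str.lower marker)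
    if 0 ≤ offset then
      if earliest_offset < 0 || offset < earliest_offset then offset else earliest_offset
    else earliest_offset) (-1)

-- ===== PORT B =====
-- the loop 'for i in range(len(t)+1): if any(t.startswith(m, i) …)' realised as recursion on the suffix t.drop i
def scanAlt (ms : List (List Char)) : List Char → Int
  | [] => if ms.any (fun m => PySem.Chars.startswith [] m) then 0 else -1
  | c :: rest =>
    if ms.any (fun m => PySem.Chars.startswith (c :: rest) m) then 0
    else
      let r := scanAlt ms rest
      if r = -1 then -1 else r + 1

def find_marker_in_text_alt (text : String) (markers : List String) : Int :=
  scanAlt (markers.map (fun m => PySem.Chars.lower m.toList)) (PySem.Chars.lower text.toList)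

-- ===== PRECONDITION & SPEC =====
def Spec_find_marker_in_text (text : String) (markers : List String) (out : Int) : Prop := out = find_marker_in_text_alt text markers
instance (text : String) (markers : List String) (out : Int) : Decidable (Spec_find_marker_in_text text markers out) := by unfold Spec_find_marker_in_text; infer_instance

-- ===== CLAIM (what is proved, stated in full; the proofs are below) =====
def Claim_equal_find_marker_in_text : Prop := ∀ (text : String) (markers : List String), Dom_find_marker_in_text text markers → Spec_find_marker_in_text text markers (find_marker_in_text text markers)

-- ===== LEMMAS AND PROOFS =====

-- "some marker of ms starts at position i of s"
def MatchAt (ms : List (List Char)) (s : List Char) (i : Nat) : Prop :=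
  ∃ m ∈ ms, m <+: s.drop i

-- characterisation of B's scan: -1 with no match anywhere, or the first matching position
theorem scanAlt_spec (ms : List (List Char)) (s : List Char) :
    (scanAlt ms s = -1 ∧ ∀ i, ¬ MatchAt ms s i) ∨
    (0 ≤ scanAlt ms s ∧ MatchAt ms s (scanAlt ms s).toNat ∧
      ∀ j < (scanAlt ms s).toNat, ¬ MatchAt ms s j) := by
  induction s with
  | nil =>
    by_cases h : ms.any (fun m => PySem.Chars.startswith [] m) = true
    · right
      simp only [scanAlt, h, if_true]
      refine ⟨by norm_num, ?_, by omega⟩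
      obtain ⟨m, hm, hp⟩ := List.any_eq_true.mp h
      exact ⟨m, hm, (PySem.Chars.startswith_iff _ _).mp hp⟩
    · left
      simp only [scanAlt, h]
      refine ⟨rfl, fun i ⟨m, hm, hp⟩ => ?_⟩
      exact h (List.any_eq_true.mpr ⟨m, hm, by simpa [PySem.Chars.startswith_iff _ _, List.drop_nil] using (by simpa [List.drop_nil] using hp : m <+: ([] : List Char))⟩)
  | cons c rest ih =>
    by_cases h : ms.any (fun m => PySem.Chars.startswith (c :: rest) m) = true
    · right
      simp only [scanAlt, h, if_true]
      refine ⟨by norm_num, ?_, by omega⟩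
      obtain ⟨m, hm, hp⟩ := List.any_eq_true.mp h
      exact ⟨m, hm, by simpa using (PySem.Chars.startswith_iff _ _).mp hp⟩
    · have h0 : ¬ MatchAt ms (c :: rest) 0 := fun ⟨m, hm, hp⟩ =>
        h (List.any_eq_true.mpr ⟨m, hm, (PySem.Chars.startswith_iff _ _).mpr (by simpa using hp)⟩)
      have hshift : ∀ i, MatchAt ms (c :: rest) (i + 1) ↔ MatchAt ms rest i := by
        intro i; unfold MatchAt; simp [List.drop_succ_cons]
      rcases ih with ⟨hr, hnone⟩ | ⟨hr0, hmat, hmin⟩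
      · left
        simp only [scanAlt, h, Bool.false_eq_true, if_false, hr]
        refine ⟨rfl, fun i => ?_⟩
        cases i with
        | zero => exact h0
        | succ i => exact fun hx => hnone i ((hshift i).mp hx)
      · right
        have hne : scanAlt ms rest ≠ -1 := by omega
        simp only [scanAlt, h, Bool.false_eq_true, if_false, if_neg hne]
        refine ⟨by omega, ?_, ?_⟩
        · have : (scanAlt ms rest + 1).toNat = (scanAlt ms rest).toNat + 1 := by omega
          rw [this]
          exact (hshift _).mpr hmat
        · intro j hj
          have : (scanAlt ms rest + 1).toNat = (scanAlt ms rest).toNat + 1 := by omega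
          rw [this] at hj
          cases j with
          | zero => exact h0
          | succ j => exact fun hx => hmin j (by omega) ((hshift j).mp hx)

-- A's fold over the lowered marker list
def foldA (t : List Char) (ms : List (List Char)) (acc : Int) : Int :=
  ms.foldl (fun earliest m =>
    let o := PySem.Chars.find t m
    if 0 ≤ o then if earliest < 0 || o < earliest then o else earliest else earliest) acc

-- characterisation of A's fold with a nonnegative accumulator
theorem foldA_nonneg_char (t : List Char) (ms : List (List Char)) :
    ∀ (acc : Int), 0 ≤ acc →
      0 ≤ foldA t ms acc ∧ foldA t ms acc ≤ acc ∧
      (foldA t ms acc = acc ∨ ∃ m ∈ ms, PySem.Chars.find t m = foldA t ms acc) ∧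
      ∀ m ∈ ms, PySem.Chars.find t m = -1 ∨ foldA t ms acc ≤ PySem.Chars.find t m := by
  induction ms with
  | nil => intro acc h; exact ⟨by simpa [foldA] using h, by simp [foldA], Or.inl (by simp [foldA]), by simp⟩
  | cons m ms ih =>
    intro acc hacc
    by_cases ho : 0 ≤ PySem.Chars.find t m
    · by_cases hlt : PySem.Chars.find t m < acc
      · have hstep : foldA t (m :: ms) acc = foldA t ms (PySem.Chars.find t m) := by
          simp only [foldA, List.foldl_cons]
          congr 1
          have : ¬ acc < 0 := by omega
          simp [ho, this, hlt]
        obtain ⟨h1, h2, h3, h4⟩ := ih (PySem.Chars.find t m) ho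
        rw [hstep]
        refine ⟨h1, by omega, ?_, ?_⟩
        · rcases h3 with h3 | ⟨m', hm', hf⟩
          · right; exact ⟨m, List.mem_cons_self, h3.symm⟩
          · right; exact ⟨m', List.mem_cons_of_mem _ hm', hf⟩
        · intro m' hm'
          rcases List.mem_cons.mp hm' with rfl | hm'
          · right; omega
          · exact h4 m' hm'
      · have hstep : foldA t (m :: ms) acc = foldA t ms acc := by
          simp only [foldA, List.foldl_cons]
          congr 1
          have : ¬ acc < 0 := by omega
          simp [ho, this, hlt]
        obtain ⟨h1, h2, h3, h4⟩ := ih acc hacc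
        rw [hstep]
        refine ⟨h1, h2, ?_, ?_⟩
        · rcases h3 with h3 | ⟨m', hm', hf⟩
          · exact Or.inl h3
          · exact Or.inr ⟨m', List.mem_cons_of_mem _ hm', hf⟩
        · intro m' hm'
          rcases List.mem_cons.mp hm' with rfl | hm'
          · right; omega
          · exact h4 m' hm'
    · have hstep : foldA t (m :: ms) acc = foldA t ms acc := by
        simp only [foldA, List.foldl_cons]; congr 1; simp [ho]
      obtain ⟨h1, h2, h3, h4⟩ := ih acc hacc
      rw [hstep]
      have hm1 : PySem.Chars.find t m = -1 := by
        have := PySem.Chars.neg_one_le_find t m; omega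
      refine ⟨h1, h2, ?_, ?_⟩
      · rcases h3 with h3 | ⟨m', hm', hf⟩
        · exact Or.inl h3
        · exact Or.inr ⟨m', List.mem_cons_of_mem _ hm', hf⟩
      · intro m' hm'
        rcases List.mem_cons.mp hm' with rfl | hm'
        · exact Or.inl hm1
        · exact h4 m' hm'

-- characterisation of A's fold started at -1: -1 with every find failing, or the minimum find
theorem foldA_char (t : List Char) (ms : List (List Char)) :
    (foldA t ms (-1) = -1 ∧ ∀ m ∈ ms, PySem.Chars.find t m = -1) ∨
    (0 ≤ foldA t ms (-1) ∧ (∃ m ∈ ms, PySem.Chars.find t m = foldA t ms (-1)) ∧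
      ∀ m ∈ ms, PySem.Chars.find t m = -1 ∨ foldA t ms (-1) ≤ PySem.Chars.find t m) := by
  induction ms with
  | nil => left; exact ⟨by simp [foldA], by simp⟩
  | cons m ms ih =>
    by_cases ho : 0 ≤ PySem.Chars.find t m
    · have hstep : foldA t (m :: ms) (-1) = foldA t ms (PySem.Chars.find t m) := by
        simp only [foldA, List.foldl_cons]; congr 1; simp [ho]
      obtain ⟨h1, h2, h3, h4⟩ := foldA_nonneg_char t ms (PySem.Chars.find t m) ho
      right
      rw [hstep]
      refine ⟨h1, ?_, ?_⟩
      · rcases h3 with h3 | ⟨m', hm', hf⟩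
        · exact ⟨m, List.mem_cons_self, h3.symm⟩
        · exact ⟨m', List.mem_cons_of_mem _ hm', hf⟩
      · intro m' hm'
        rcases List.mem_cons.mp hm' with rfl | hm'
        · right; omega
        · exact h4 m' hm'
    · have hstep : foldA t (m :: ms) (-1) = foldA t ms (-1) := by
        simp only [foldA, List.foldl_cons]; congr 1; simp [ho]
      have hm1 : PySem.Chars.find t m = -1 := by
        have := PySem.Chars.neg_one_le_find t m; omega
      rw [hstep]
      rcases ih with ⟨h1, h2⟩ | ⟨h1, h2, h3⟩
      · left
        refine ⟨h1, fun m' hm' => ?_⟩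
        rcases List.mem_cons.mp hm' with rfl | hm'
        · exact hm1
        · exact h2 m' hm'
      · right
        refine ⟨h1, ?_, ?_⟩
        · obtain ⟨m', hm', hf⟩ := h2; exact ⟨m', List.mem_cons_of_mem _ hm', hf⟩
        · intro m' hm'
          rcases List.mem_cons.mp hm' with rfl | hm'
          · exact Or.inl hm1
          · exact h3 m' hm'

-- a marker starting at position j is found by find no later than j
theorem find_le_of_matchAt (t m : List Char) (j : Nat) (h : m <+: t.drop j) :
    0 ≤ PySem.Chars.find t m ∧ PySem.Chars.find t m ≤ (j : Int) := by
  have hin : PySem.Chars.isIn m t = true :=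
    (PySem.Chars.exists_prefix_drop_iff_isIn m t).mp ⟨j, h⟩
  have h0 : 0 ≤ PySem.Chars.find t m :=
    (PySem.Chars.find_nonneg_iff t m).mpr ((PySem.Chars.isIn_iff_infix m t).mp hin)
  refine ⟨h0, ?_⟩
  obtain ⟨-, hmin⟩ := PySem.Chars.find_spec h0
  by_contra hlt
  exact hmin j (by omega) h

theorem find_marker_in_text_spec : Claim_equal_find_marker_in_text := by
  intro text markers _
  unfold Spec_find_marker_in_text
  have hA : find_marker_in_text text markers =
      foldA (PySem.Chars.lower text.toList) (markers.map fun m => PySem.Chars.lower m.toList) (-1) := by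
    unfold find_marker_in_text foldA
    rw [List.foldl_map]
    simp only [PySem.Str.find_eq, PySem.Str.toList_lower]
  have hB : find_marker_in_text_alt text markers =
      scanAlt (markers.map fun m => PySem.Chars.lower m.toList) (PySem.Chars.lower text.toList) := rfl
  rw [hA, hB]
  rcases foldA_char (PySem.Chars.lower text.toList) (markers.map fun m => PySem.Chars.lower m.toList) with
      ⟨ha1, ha2⟩ | ⟨ha1, ⟨m0, hm0, hf0⟩, ha3⟩ <;>
    rcases scanAlt_spec (markers.map fun m => PySem.Chars.lower m.toList) (PySem.Chars.lower text.toList) with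
      ⟨hb1, hb2⟩ | ⟨hb1, hb2, hb3⟩
  · omega
  · exfalso
    obtain ⟨m, hm, hp⟩ := hb2
    have h1 := (find_le_of_matchAt _ m _ hp).1
    have h2 := ha2 m hm
    omega
  · exfalso
    have h0 : 0 ≤ PySem.Chars.find (PySem.Chars.lower text.toList) m0 := by omega
    obtain ⟨hpre, -⟩ := PySem.Chars.find_spec h0
    exact hb2 _ ⟨m0, hm0, by rwa [hf0] at hpre⟩
  · have h0 : 0 ≤ PySem.Chars.find (PySem.Chars.lower text.toList) m0 := by omega
    obtain ⟨hpre, -⟩ := PySem.Chars.find_spec h0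
    have hbA : MatchAt (markers.map fun m => PySem.Chars.lower m.toList) (PySem.Chars.lower text.toList)
        (foldA (PySem.Chars.lower text.toList) (markers.map fun m => PySem.Chars.lower m.toList) (-1)).toNat :=
      ⟨m0, hm0, by rwa [hf0] at hpre⟩
    have hsle : (scanAlt (markers.map fun m => PySem.Chars.lower m.toList) (PySem.Chars.lower text.toList)).toNat ≤
        (foldA (PySem.Chars.lower text.toList) (markers.map fun m => PySem.Chars.lower m.toList) (-1)).toNat := by
      by_contra hlt
      exact hb3 _ (by omega) hbA
    obtain ⟨m, hm, hp⟩ := hb2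
    obtain ⟨hfin0, hfinle⟩ := find_le_of_matchAt _ m _ hp
    rcases ha3 m hm with hbad | hle <;> omega
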